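-- pv_equiv track=rewrite | github.com/IshitaTakeshi/CodingTheory | prefixcode.py | dangling_suffixes
-- ===== SOURCE A (Python) =====
-- def dangling_suffixes(code1, code2):
--     def suffixes(code, word):
--         N = len(word)
--         s = set()
--         for c in code:
--             if c == word:
--                 continue
--             if c.startswith(word):
--                 s.add(c[N:])
--         return s
--
--     ss = set()
--     for c1 in code1:
--         ss |= suffixes(code2, c1)
--     for c2 in code2:
--         ss |= suffixes(code1, c2)
--     return ss
-- ===== SOURCE B (Python) =====
-- def dangling_suffixes(code1, code2):
--     # Build, once per code, an index mapping each proper prefix of a codeword to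
--     # the list of corresponding (nonempty) suffixes, in codeword order; then each
--     # query word is a single dict lookup instead of a scan over the whole code.
--     def build_index(code):
--         idx = {}
--         for c in code:
--             pre, rest = "", c
--             while rest:
--                 idx.setdefault(pre, []).append(rest)
--                 pre, rest = pre + rest[0], rest[1:]
--         return idx
--
--     idx1 = build_index(code1)
--     idx2 = build_index(code2)
--     ss = set()
--     for w in code1:
--         for suf in idx2.get(w, []):
--             ss.add(suf)
--     for w in code2:
--         for suf in idx1.get(w, []):
--             ss.add(suf)
--     return ss
-- ===== Notes on version B (the rewrite author's own statement) =====
-- stated objective: faster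
-- what changed: Instead of scanning the whole other code for every word, B builds one dict per code mapping every proper prefix of a codeword to its list of suffixes, so each word's matches become a single dict lookup.
import Mathlib
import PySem

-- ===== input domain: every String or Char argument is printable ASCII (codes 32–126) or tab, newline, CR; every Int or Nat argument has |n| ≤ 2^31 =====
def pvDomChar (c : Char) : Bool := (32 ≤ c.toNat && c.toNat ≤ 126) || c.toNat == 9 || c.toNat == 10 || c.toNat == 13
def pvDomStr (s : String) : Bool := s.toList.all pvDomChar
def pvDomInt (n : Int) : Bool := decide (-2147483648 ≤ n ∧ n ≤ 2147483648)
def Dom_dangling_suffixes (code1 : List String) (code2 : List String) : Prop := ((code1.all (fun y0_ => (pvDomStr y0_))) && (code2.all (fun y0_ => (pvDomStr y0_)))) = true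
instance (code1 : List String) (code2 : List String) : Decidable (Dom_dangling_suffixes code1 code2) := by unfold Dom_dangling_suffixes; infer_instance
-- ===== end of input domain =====

-- B replaces A's per-word scan of the whole other code by a prefix→suffixes index
-- built once per code, so each word becomes one dict lookup (objective: faster).

-- ===== PORT A =====
-- A's inner helper 'suffixes(code, word)': scan code, collect suffixes of words
-- that strictly extend word, into a set.
def pySuffixes (code : List String) (word : String) : PySem.Set String :=
  let N : Int := PySem.Str.len word
  code.foldl (fun s c =>
    if c == word then s
    else if PySem.Str.startswith c word then PySem.Set.add s (PySem.Str.slice c (some N) none)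
    else s) PySem.Set.empty

def dangling_suffixes (code1 : List String) (code2 : List String) : List String :=
  let ss1 := code1.foldl (fun ss c1 => PySem.Set.union ss (pySuffixes code2 c1)) PySem.Set.empty
  code2.foldl (fun ss c2 => PySem.Set.union ss (pySuffixes code1 c2)) ss1

-- ===== PORT B =====
-- Source B's inner while loop over (pre, rest); 'idx.setdefault(pre, []).append(rest)'
-- is exactly Dict.modify pre [] (· ++ [rest]) (insert [] if absent, then append).
def pvIndexWord (d : PySem.Dict String (List String)) (pre rest : List Char) :
    PySem.Dict String (List String) :=
  match rest with
  | [] => d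
  | ch :: rs =>
      pvIndexWord (PySem.Dict.modify d (String.ofList pre) [] (· ++ [String.ofList (ch :: rs)]))
        (pre ++ [ch]) rs

def pvBuildIndex (code : List String) : PySem.Dict String (List String) :=
  code.foldl (fun d c => pvIndexWord d [] c.toList) PySem.Dict.empty

def dangling_suffixes_alt (code1 : List String) (code2 : List String) : List String :=
  let idx1 := pvBuildIndex code1
  let idx2 := pvBuildIndex code2
  let ss1 := code1.foldl (fun ss w =>
    (PySem.Dict.getD idx2 w []).foldl (fun ss suf => PySem.Set.add ss suf) ss) PySem.Set.empty
  code2.foldl (fun ss w =>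
    (PySem.Dict.getD idx1 w []).foldl (fun ss suf => PySem.Set.add ss suf) ss) ss1

-- ===== PRECONDITION & SPEC =====
def Spec_dangling_suffixes (code1 : List String) (code2 : List String) (out : List String) : Prop := out = dangling_suffixes_alt code1 code2
instance (code1 : List String) (code2 : List String) (out : List String) : Decidable (Spec_dangling_suffixes code1 code2 out) := by unfold Spec_dangling_suffixes; infer_instance

-- ===== CLAIM (what is proved, stated in full; the proofs are below) =====
def Claim_equal_dangling_suffixes : Prop := ∀ (code1 : List String) (code2 : List String), Dom_dangling_suffixes code1 code2 → Spec_dangling_suffixes code1 code2 (dangling_suffixes code1 code2)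

-- ===== LEMMAS AND PROOFS =====

-- The common characterisation: the suffixes contributed by scanning `code` for `word`,
-- with multiplicity and in code order.
def pvFilt (code : List String) (word : String) : List String :=
  code.filterMap (fun c =>
    if c ≠ word ∧ word.toList <+: c.toList
    then some (String.ofList (c.toList.drop word.toList.length)) else none)

-- The per-word entries Source B's index loop appends for key w while walking (pre, rest).
def pvContrib (pre rest : List Char) (w : String) : List String :=
  match rest with
  | [] => []
  | ch :: rs =>
      (if String.ofList pre = w then [String.ofList (ch :: rs)] else []) ++ pvContrib (pre ++ [ch]) rs w

theorem pvSlice_eq (c w : String) :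
    PySem.Str.slice c (some (PySem.Str.len w)) none = String.ofList (c.toList.drop w.toList.length) := by
  apply String.toList_inj.mp; simp [pysem]

theorem pvStartswith_iff (c w : String) :
    PySem.Str.startswith c w = true ↔ w.toList <+: c.toList := by
  rw [PySem.Str.startswith_eq]; exact PySem.Chars.startswith_iff c.toList w.toList

theorem pySuffixes_foldl (code : List String) (word : String) (s0 : PySem.Set String) :
    code.foldl (fun s c =>
      if c == word then s
      else if PySem.Str.startswith c word then
        PySem.Set.add s (PySem.Str.slice c (some (PySem.Str.len word)) none)
      else s) s0 = (pvFilt code word).foldl PySem.Set.add s0 := by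
  induction code generalizing s0 with
  | nil => rfl
  | cons c cs ih =>
      have hfilt : pvFilt (c :: cs) word
          = (if c ≠ word ∧ word.toList <+: c.toList
             then [String.ofList (c.toList.drop word.toList.length)] else []) ++ pvFilt cs word := by
        simp only [pvFilt, List.filterMap_cons]
        by_cases h : c ≠ word ∧ word.toList <+: c.toList
        · simp [h]
        · simp [h]
      simp only [List.foldl_cons]
      rw [hfilt, List.foldl_append]
      by_cases h : c ≠ word ∧ word.toList <+: c.toList
      · rw [if_pos h, if_neg (by simp [h.1] : ¬ (c == word) = true),
          if_pos ((pvStartswith_iff c word).mpr h.2), pvSlice_eq]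
        exact ih _
      · rw [if_neg h]
        by_cases hcw : c = word
        · rw [if_pos (by simp [hcw] : (c == word) = true)]
          exact ih s0
        · have hpre : ¬ word.toList <+: c.toList := fun hp => h ⟨hcw, hp⟩
          rw [if_neg (by simp [hcw] : ¬ (c == word) = true),
            if_neg (fun hh => hpre ((pvStartswith_iff c word).mp hh))]
          exact ih s0

-- folding add over a deduplicated list is folding add over the original list
theorem update_ofList (s : PySem.Set String) (l : List String) :
    PySem.Set.update s (PySem.Set.ofList l) = PySem.Set.update s l := by
  rw [PySem.Set.update_eq_append_filter, PySem.Set.update_eq_append_filter, PySem.Set.ofList_ofList]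

theorem unionA (ss : PySem.Set String) (code : List String) (word : String) :
    PySem.Set.union ss (pySuffixes code word) = (pvFilt code word).foldl PySem.Set.add ss := by
  have h1 : pySuffixes code word = (pvFilt code word).foldl PySem.Set.add PySem.Set.empty :=
    pySuffixes_foldl code word PySem.Set.empty
  have h2 : PySem.Set.union ss (pySuffixes code word)
      = PySem.Set.update ss (PySem.Set.ofList (pvFilt code word)) := by
    rw [h1]; rfl
  rw [h2, update_ofList]; rfl

theorem getD_pvIndexWord (rest : List Char) : ∀ (pre : List Char)
    (d : PySem.Dict String (List String)) (w : String),
    PySem.Dict.getD (pvIndexWord d pre rest) w []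
      = PySem.Dict.getD d w [] ++ pvContrib pre rest w := by
  induction rest with
  | nil => intro pre d w; simp [pvIndexWord, pvContrib]
  | cons ch rs ih =>
      intro pre d w
      rw [pvIndexWord, ih, pvContrib, PySem.Dict.getD_modify]
      by_cases h : w = String.ofList pre
      · simp [h]
      · have h' : String.ofList pre ≠ w := fun hh => h hh.symm
        simp [h, h']

-- pvContrib characterised: exactly one entry when w strictly extends pre inside pre ++ rest
theorem pvContrib_spec (rest : List Char) : ∀ (pre : List Char) (w : String),
    pvContrib pre rest w
      = if pre <+: w.toList ∧ w.toList <+: (pre ++ rest) ∧ w.toList ≠ pre ++ rest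
        then [String.ofList ((pre ++ rest).drop w.toList.length)] else [] := by
  induction rest with
  | nil =>
      intro pre w
      rw [pvContrib, if_neg]
      rintro ⟨h1, h2, h3⟩
      simp only [List.append_nil] at h2 h3
      exact h3 (List.IsPrefix.eq_of_length_le h2 h1.length_le)
  | cons ch rs ih =>
      intro pre w
      rw [pvContrib, ih]
      by_cases hw : String.ofList pre = w
      · -- the key matches here and nowhere deeper
        have hwl : w.toList = pre := by rw [← hw]; simp
        have hnotdeep : ¬ ((pre ++ [ch]) <+: w.toList ∧ w.toList <+: ((pre ++ [ch]) ++ rs)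
            ∧ w.toList ≠ (pre ++ [ch]) ++ rs) := by
          rintro ⟨h1, -, -⟩
          have := h1.length_le
          simp [hwl] at this
        have hcond : pre <+: w.toList ∧ w.toList <+: (pre ++ ch :: rs) ∧ w.toList ≠ pre ++ ch :: rs := by
          refine ⟨by simp [hwl], ⟨ch :: rs, by simp [hwl]⟩, ?_⟩
          rw [hwl]
          intro h
          have := congrArg List.length h
          simp at this
        rw [if_neg hnotdeep, if_pos hcond, if_pos hw]
        rw [hwl]
        simp
      · -- key does not match here; deeper condition ⟺ overall condition
        have hwl : w.toList ≠ pre := fun h => hw (by rw [← h]; simp)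
        have hiff : ((pre ++ [ch]) <+: w.toList ∧ w.toList <+: ((pre ++ [ch]) ++ rs) ∧ w.toList ≠ (pre ++ [ch]) ++ rs)
            ↔ (pre <+: w.toList ∧ w.toList <+: (pre ++ ch :: rs) ∧ w.toList ≠ pre ++ ch :: rs) := by
          constructor
          · rintro ⟨h1, h2, h3⟩
            refine ⟨(List.prefix_append pre [ch]).trans h1, by simpa using h2, by simpa using h3⟩
          · rintro ⟨h1, h2, h3⟩
            refine ⟨?_, by simpa using h2, by simpa using h3⟩
            obtain ⟨t, ht⟩ := h1
            obtain ⟨u, hu⟩ := h2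
            cases t with
            | nil => exact absurd (by simp [← ht]) hwl
            | cons x xs =>
                rw [← ht, List.append_assoc] at hu
                have hu' := List.append_cancel_left hu
                have hx : x = ch := (List.cons_eq_cons.mp (by simpa using hu')).1
                exact ⟨xs, by rw [← ht, hx]; simp⟩
        by_cases hc : pre <+: w.toList ∧ w.toList <+: (pre ++ ch :: rs) ∧ w.toList ≠ pre ++ ch :: rs
        · rw [if_pos (hiff.mpr hc), if_pos hc, if_neg hw]
          simp
        · rw [if_neg (fun h => hc (hiff.mp h)), if_neg hc, if_neg hw]
          rfl

theorem getD_pvBuildIndex (code : List String) (w : String) :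
    PySem.Dict.getD (pvBuildIndex code) w [] = pvFilt code w := by
  have key : ∀ (d : PySem.Dict String (List String)),
      PySem.Dict.getD (code.foldl (fun d c => pvIndexWord d [] c.toList) d) w []
        = PySem.Dict.getD d w [] ++ pvFilt code w := by
    induction code with
    | nil => intro d; simp [pvFilt]
    | cons c cs ih =>
        intro d
        rw [List.foldl_cons, ih, getD_pvIndexWord, pvContrib_spec]
        have hone : (if [] <+: w.toList ∧ w.toList <+: (([] : List Char) ++ c.toList) ∧ w.toList ≠ ([] : List Char) ++ c.toList
            then [String.ofList ((([] : List Char) ++ c.toList).drop w.toList.length)] else [])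
            = (if c ≠ w ∧ w.toList <+: c.toList
               then [String.ofList (c.toList.drop w.toList.length)] else []) := by
          by_cases h : c ≠ w ∧ w.toList <+: c.toList
          · rw [if_pos h, if_pos]
            · simp
            · exact ⟨List.nil_prefix, by simpa using h.2,
                by simpa using fun hh => h.1 (String.toList_inj.mp hh.symm)⟩
          · rw [if_neg h, if_neg]
            rintro ⟨_, h2, h3⟩
            exact h ⟨fun hh => h3 (by simp [hh]), by simpa using h2⟩
        have hfilt : pvFilt (c :: cs) w
            = (if c ≠ w ∧ w.toList <+: c.toList
               then [String.ofList (c.toList.drop w.toList.length)] else []) ++ pvFilt cs w := by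
          simp only [pvFilt, List.filterMap_cons]
          by_cases h : c ≠ w ∧ w.toList <+: c.toList
          · simp [h]
          · simp [h]
        rw [hone, hfilt, List.append_assoc]
  rw [pvBuildIndex, key PySem.Dict.empty]
  simp

theorem innerB (ss : PySem.Set String) (idx : PySem.Dict String (List String)) (w : String)
    (code : List String) (h : PySem.Dict.getD idx w [] = pvFilt code w) :
    (PySem.Dict.getD idx w []).foldl (fun ss suf => PySem.Set.add ss suf) ss
      = (pvFilt code w).foldl PySem.Set.add ss := by
  rw [h]

-- ===== VERDICT (by name: the statement is the Claim_ definition above) =====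
theorem dangling_suffixes_spec : Claim_equal_dangling_suffixes := by
  intro code1 code2 _
  unfold Spec_dangling_suffixes dangling_suffixes dangling_suffixes_alt
  have step1 : (fun (ss : PySem.Set String) (c1 : String) => PySem.Set.union ss (pySuffixes code2 c1))
      = fun ss w => (PySem.Dict.getD (pvBuildIndex code2) w []).foldl (fun ss suf => PySem.Set.add ss suf) ss := by
    funext ss w
    rw [unionA, innerB ss _ w code2 (getD_pvBuildIndex code2 w)]
  have step2 : (fun (ss : PySem.Set String) (c2 : String) => PySem.Set.union ss (pySuffixes code1 c2))
      = fun ss w => (PySem.Dict.getD (pvBuildIndex code1) w []).foldl (fun ss suf => PySem.Set.add ss suf) ss := by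
    funext ss w
    rw [unionA, innerB ss _ w code1 (getD_pvBuildIndex code1 w)]
  rw [step1, step2]
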